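-- pv_equiv track=rewrite | github.com/suzuking19/atcoder | beginners_selection/I.py | money_counter
-- ===== SOURCE A (Python) =====
-- def money_counter(number: int, amount: int) -> list[int]:
--     for i in range(0, number+1):
--         for j in range(0, number+1-i):
--             for k in range(0, number+1-i-j):
--                 if 10000*i + 5000*j + 1000*k == amount:
--                     if i + j + k == number:
--                         return [i, j, k]
--
--     return [-1, -1, -1]
-- ===== SOURCE B (Python) =====
-- def money_counter(number: int, amount: int) -> list[int]:
--     # solve the 2x2 linear system for (j, k) given i: O(n) instead of O(n^3)
--     for i in range(0, number + 1):
--         r = amount - 9000 * i - 1000 * number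
--         if r >= 0 and r % 4000 == 0:
--             j = r // 4000
--             k = number - i - j
--             if k >= 0:
--                 return [i, j, k]
--     return [-1, -1, -1]
-- ===== Notes on version B (the rewrite author's own statement) =====
-- stated objective: faster
-- what changed: Replaced the triple nested search over (i,j,k) by a single loop over i that solves the 2x2 linear system for (j,k) in closed form (4000*j = amount - 9000*i - 1000*number), checking divisibility and nonnegativity.
import Mathlib
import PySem

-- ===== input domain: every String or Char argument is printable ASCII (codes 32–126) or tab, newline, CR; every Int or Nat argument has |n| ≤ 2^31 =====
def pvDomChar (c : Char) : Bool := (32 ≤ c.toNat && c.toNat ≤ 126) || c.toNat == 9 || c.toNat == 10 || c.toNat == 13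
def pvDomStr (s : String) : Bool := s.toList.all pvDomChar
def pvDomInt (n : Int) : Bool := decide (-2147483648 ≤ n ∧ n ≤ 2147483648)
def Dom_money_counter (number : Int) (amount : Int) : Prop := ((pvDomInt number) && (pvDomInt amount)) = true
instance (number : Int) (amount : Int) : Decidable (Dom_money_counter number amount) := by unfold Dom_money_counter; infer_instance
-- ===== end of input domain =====

-- B replaces A's O(n^3) triple search by a single loop over i solving the linear system for (j,k).

-- ===== PORT A =====
-- triple nested 'for … return' ported as nested findSome? over the same ranges
def money_counter (number : Int) (amount : Int) : List Int :=
  match (PySem.List.pyRange 0 (number + 1) 1).findSome? (fun i =>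
    (PySem.List.pyRange 0 (number + 1 - i) 1).findSome? (fun j =>
      (PySem.List.pyRange 0 (number + 1 - i - j) 1).findSome? (fun k =>
        if 10000 * i + 5000 * j + 1000 * k = amount then
          if i + j + k = number then some [i, j, k] else none
        else none))) with
  | some r => r
  | none => [-1, -1, -1]

-- ===== PORT B =====
-- B's per-i body: solve 4000*j = amount - 9000*i - 1000*number in closed form
def mcAltStep (number : Int) (amount : Int) (i : Int) : Option (List Int) :=
  let r := amount - 9000 * i - 1000 * number
  if 0 ≤ r ∧ PySem.Int.mod r 4000 = 0 then
    let j := PySem.Int.floordiv r 4000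
    let k := number - i - j
    if 0 ≤ k then some [i, j, k] else none
  else none

def money_counter_alt (number : Int) (amount : Int) : List Int :=
  match (PySem.List.pyRange 0 (number + 1) 1).findSome? (mcAltStep number amount) with
  | some r => r
  | none => [-1, -1, -1]

-- ===== PRECONDITION & SPEC =====
def Spec_money_counter (number : Int) (amount : Int) (out : List Int) : Prop := out = money_counter_alt number amount
instance (number : Int) (amount : Int) (out : List Int) : Decidable (Spec_money_counter number amount out) := by unfold Spec_money_counter; infer_instance

-- ===== CLAIM (what is proved, stated in full; the proofs are below) =====
def Claim_equal_money_counter : Prop := ∀ (number : Int) (amount : Int), Dom_money_counter number amount → Spec_money_counter number amount (money_counter number amount)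

-- ===== LEMMAS AND PROOFS =====

-- findSome? over a list with at most one productive element equals f at that element
theorem findSome?_unique {α β : Type} (f : α → Option β) (l : List α) (a : α)
    (ha : a ∈ l) (h : ∀ x ∈ l, x ≠ a → f x = none) : l.findSome? f = f a := by
  induction l with
  | nil => cases ha
  | cons b t ih =>
    by_cases hb : b = a
    · subst hb
      cases hfa : f b with
      | some v => simp [List.findSome?, hfa]
      | none =>
        simp only [List.findSome?, hfa]
        rw [List.findSome?_eq_none_iff]
        intro x hx
        by_cases hxa : x = b
        · simpa [hxa] using hfa
        · exact h x (List.mem_cons_of_mem _ hx) hxa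
    · have hfb : f b = none := h b (List.mem_cons_self) hb
      have ha' : a ∈ t := by
        cases ha with
        | head => exact absurd rfl hb
        | tail _ h' => exact h'
      simp only [List.findSome?, hfb]
      exact ih ha' (fun x hx => h x (List.mem_cons_of_mem _ hx))

-- per-i: A's inner double loop equals B's closed-form step
theorem inner_eq (number amount i : Int) :
    (PySem.List.pyRange 0 (number + 1 - i) 1).findSome? (fun j =>
      (PySem.List.pyRange 0 (number + 1 - i - j) 1).findSome? (fun k =>
        if 10000 * i + 5000 * j + 1000 * k = amount then
          if i + j + k = number then some [i, j, k] else none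
        else none)) = mcAltStep number amount i := by
  set r := amount - 9000 * i - 1000 * number with hr
  by_cases hcond : (0 ≤ r ∧ PySem.Int.mod r 4000 = 0) ∧ 0 ≤ number - i - PySem.Int.floordiv r 4000
  · obtain ⟨⟨hr0, hm⟩, hk0⟩ := hcond
    set j0 := PySem.Int.floordiv r 4000 with hj0
    set k0 := number - i - j0 with hk0d
    have hrq : j0 * 4000 + PySem.Int.mod r 4000 = r := PySem.Int.floordiv_mul_add_mod r 4000
    have hreq : r = 4000 * j0 := by omega
    have hj0nn : 0 ≤ j0 := by omega
    -- the outer loop hits only j0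
    rw [findSome?_unique _ _ j0]
    · -- at j0 the inner loop hits only k0
      rw [findSome?_unique _ _ k0]
      · have h1 : 10000 * i + 5000 * j0 + 1000 * k0 = amount := by omega
        have h2 : i + j0 + k0 = number := by omega
        simp only [h1, h2, if_true, mcAltStep]
        rw [if_pos ⟨hr0, hm⟩, if_pos hk0]
      · rw [PySem.List.mem_pyRange_one]; omega
      · intro k hk hkne
        rw [PySem.List.mem_pyRange_one] at hk
        split_ifs with c1 c2
        · exact absurd (by omega : k = k0) hkne
        · rfl
        · rfl
    · rw [PySem.List.mem_pyRange_one]; omega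
    · intro j hj hjne
      rw [PySem.List.mem_pyRange_one] at hj
      rw [List.findSome?_eq_none_iff]
      intro k hk
      rw [PySem.List.mem_pyRange_one] at hk
      split_ifs with c1 c2
      · exact absurd (by omega : j = j0) hjne
      · rfl
      · rfl
  · -- no solution for this i: both sides are none
    have hnone : ∀ j ∈ PySem.List.pyRange 0 (number + 1 - i) 1,
        (PySem.List.pyRange 0 (number + 1 - i - j) 1).findSome? (fun k =>
          if 10000 * i + 5000 * j + 1000 * k = amount then
            if i + j + k = number then some [i, j, k] else none
          else none) = none := by
      intro j hj
      rw [PySem.List.mem_pyRange_one] at hj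
      rw [List.findSome?_eq_none_iff]
      intro k hk
      rw [PySem.List.mem_pyRange_one] at hk
      split_ifs with c1 c2
      · exfalso
        have hreq : r = 4000 * j := by omega
        have hdvd : (4000 : Int) ∣ r := ⟨j, hreq⟩
        have hm : PySem.Int.mod r 4000 = 0 := (PySem.Int.mod_eq_zero_iff_dvd r 4000).2 hdvd
        have hfd : PySem.Int.floordiv r 4000 = j := by
          rw [PySem.Int.floordiv_eq_iff_of_pos (by norm_num)]; omega
        exact hcond ⟨⟨by omega, hm⟩, by rw [hfd]; omega⟩
      · rfl
      · rfl
    rw [List.findSome?_eq_none_iff.2 hnone]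
    simp only [mcAltStep]
    split_ifs with c1 c2
    · exfalso; exact hcond ⟨c1, c2⟩
    · rfl
    · rfl

-- ===== VERDICT (by name: the statement is the Claim_ definition above) =====
theorem money_counter_spec : Claim_equal_money_counter := by
  intro number amount _
  unfold Spec_money_counter money_counter money_counter_alt
  have : (fun i => (PySem.List.pyRange 0 (number + 1 - i) 1).findSome? (fun j =>
      (PySem.List.pyRange 0 (number + 1 - i - j) 1).findSome? (fun k =>
        if 10000 * i + 5000 * j + 1000 * k = amount then
          if i + j + k = number then some [i, j, k] else none
        else none))) = mcAltStep number amount := funext (inner_eq number amount)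
  rw [this]
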